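-- pv_equiv track=rewrite | github.com/gbordes77/Manalytics | src/orchestrator.py | _extract_simple_archetype_name
-- ===== SOURCE A (Python) =====
-- def _extract_simple_archetype_name(archetype_with_colors):
--     """Extract simple archetype name without color prefixes for backwards compatibility"""
--     if not archetype_with_colors or archetype_with_colors == "Others":
--         return "Others"
--
--     # Remove common color prefixes
--     color_prefixes = [
--         "Azorius ",
--         "Dimir ",
--         "Rakdos ",
--         "Gruul ",
--         "Selesnya ",
--         "Orzhov ",
--         "Izzet ",
--         "Golgari ",
--         "Boros ",
--         "Simic ",
--         "Esper ",
--         "Grixis ",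
--         "Jund ",
--         "Naya ",
--         "Bant ",
--         "Mono-White ",
--         "Mono-Blue ",
--         "Mono-Black ",
--         "Mono-Red ",
--         "Mono-Green ",
--         "White ",
--         "Blue ",
--         "Black ",
--         "Red ",
--         "Green ",
--         "Five-Color ",
--         "5C ",
--         "WUBRG ",
--         "Sans-White ",
--         "Sans-Blue ",
--         "Sans-Black ",
--         "Sans-Red ",
--         "Sans-Green ",
--     ]
--
--     simple_name = archetype_with_colors
--     for prefix in color_prefixes:
--         if simple_name.startswith(prefix):
--             simple_name = simple_name[len(prefix) :]
--             break
--
--     return simple_name if simple_name else "Others"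
-- ===== SOURCE B (Python) =====
-- _COLOR_TOKENS = frozenset(
--     "Azorius Dimir Rakdos Gruul Selesnya Orzhov Izzet Golgari Boros Simic "
--     "Esper Grixis Jund Naya Bant Mono-White Mono-Blue Mono-Black Mono-Red "
--     "Mono-Green White Blue Black Red Green Five-Color 5C WUBRG "
--     "Sans-White Sans-Blue Sans-Black Sans-Red Sans-Green".split()
-- )
--
--
-- def _extract_simple_archetype_name(archetype_with_colors):
--     """Extract simple archetype name without color prefixes for backwards compatibility"""
--     if not archetype_with_colors or archetype_with_colors == "Others":
--         return "Others"
--     head, sep, tail = archetype_with_colors.partition(" ")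
--     if sep and head in _COLOR_TOKENS:
--         return tail or "Others"
--     return archetype_with_colors
-- ===== Notes on version B (the rewrite author's own statement) =====
-- stated objective: idiomatic
-- what changed: Replaces A's ordered scan of 33 startswith prefix tests (loop with break, then slicing) by one partition of the name at its first space and a single frozenset membership test on the extracted first word.
import Mathlib
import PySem

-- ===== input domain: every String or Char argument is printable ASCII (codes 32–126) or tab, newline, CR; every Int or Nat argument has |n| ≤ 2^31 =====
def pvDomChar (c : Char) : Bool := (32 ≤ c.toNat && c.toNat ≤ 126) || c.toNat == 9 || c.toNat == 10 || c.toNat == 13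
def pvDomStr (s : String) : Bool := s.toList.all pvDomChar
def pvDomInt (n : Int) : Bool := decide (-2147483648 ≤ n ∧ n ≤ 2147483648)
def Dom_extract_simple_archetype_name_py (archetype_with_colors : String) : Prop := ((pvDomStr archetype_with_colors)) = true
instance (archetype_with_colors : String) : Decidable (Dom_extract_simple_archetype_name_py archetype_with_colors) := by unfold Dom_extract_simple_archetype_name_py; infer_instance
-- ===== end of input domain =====

-- B replaces A's ordered scan of 33 startswith prefix tests by one partition of the
-- name at its first space and a single set-membership test on the first word (idiomatic).

-- ===== PORT A =====
def pvColorPrefixes : List String :=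
  ["Azorius ", "Dimir ", "Rakdos ", "Gruul ", "Selesnya ", "Orzhov ", "Izzet ",
   "Golgari ", "Boros ", "Simic ", "Esper ", "Grixis ", "Jund ", "Naya ", "Bant ",
   "Mono-White ", "Mono-Blue ", "Mono-Black ", "Mono-Red ", "Mono-Green ",
   "White ", "Blue ", "Black ", "Red ", "Green ",
   "Five-Color ", "5C ", "WUBRG ",
   "Sans-White ", "Sans-Blue ", "Sans-Black ", "Sans-Red ", "Sans-Green "]

-- A's for-loop with `break`: try each prefix in order, strip the first one that matches.
def pvStripFirst : List String → String → String
  | [], s => s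
  | p :: ps, s =>
    if PySem.Str.startswith s p then PySem.Str.slice s (some (PySem.Str.len p)) none
    else pvStripFirst ps s

def extract_simple_archetype_name_py (archetype_with_colors : String) : String :=
  if archetype_with_colors = "" || archetype_with_colors = "Others" then "Others"
  else
    let simple_name := pvStripFirst pvColorPrefixes archetype_with_colors
    if simple_name = "" then "Others" else simple_name

-- ===== PORT B =====
-- Source B builds its token set by splitting one space-separated literal on whitespace.
def pvColorTokens : PySem.Set String :=
  PySem.Set.ofList (PySem.Str.split₀
    ("Azorius Dimir Rakdos Gruul Selesnya Orzhov Izzet Golgari Boros Simic " ++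
     "Esper Grixis Jund Naya Bant Mono-White Mono-Blue Mono-Black Mono-Red " ++
     "Mono-Green White Blue Black Red Green Five-Color 5C WUBRG " ++
     "Sans-White Sans-Blue Sans-Black Sans-Red Sans-Green"))

-- Hand port of str.partition(" ") (single-char separator), exact: scans once for the
-- first space, returning (before, found?, after).
def pvPartitionSpace : List Char → List Char × Bool × List Char
  | [] => ([], false, [])
  | c :: cs =>
    if c = ' ' then ([], true, cs)
    else
      let r := pvPartitionSpace cs
      (c :: r.1, r.2.1, r.2.2)

def extract_simple_archetype_name_py_alt (archetype_with_colors : String) : String :=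
  if archetype_with_colors = "" || archetype_with_colors = "Others" then "Others"
  else
    match pvPartitionSpace archetype_with_colors.toList with
    | (head, true, tail) =>
      if PySem.Set.contains pvColorTokens (String.ofList head) then
        (if String.ofList tail = "" then "Others" else String.ofList tail)
      else archetype_with_colors
    | (_, false, _) => archetype_with_colors

-- ===== PRECONDITION & SPEC =====
def Spec_extract_simple_archetype_name_py (archetype_with_colors : String) (out : String) : Prop := out = extract_simple_archetype_name_py_alt archetype_with_colors
instance (archetype_with_colors : String) (out : String) : Decidable (Spec_extract_simple_archetype_name_py archetype_with_colors out) := by unfold Spec_extract_simple_archetype_name_py; infer_instance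

-- ===== CLAIM (what is proved, stated in full; the proofs are below) =====
def Claim_equal_extract_simple_archetype_name_py : Prop := ∀ (archetype_with_colors : String), Dom_extract_simple_archetype_name_py archetype_with_colors → Spec_extract_simple_archetype_name_py archetype_with_colors (extract_simple_archetype_name_py archetype_with_colors)

-- ===== LEMMAS AND PROOFS =====

-- The token list behind both literals.
def pvToks : List String :=
  ["Azorius", "Dimir", "Rakdos", "Gruul", "Selesnya", "Orzhov", "Izzet",
   "Golgari", "Boros", "Simic", "Esper", "Grixis", "Jund", "Naya", "Bant",
   "Mono-White", "Mono-Blue", "Mono-Black", "Mono-Red", "Mono-Green",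
   "White", "Blue", "Black", "Red", "Green",
   "Five-Color", "5C", "WUBRG",
   "Sans-White", "Sans-Blue", "Sans-Black", "Sans-Red", "Sans-Green"]

theorem pvPrefixes_eq_map : pvColorPrefixes = pvToks.map (· ++ " ") := by decide

set_option maxRecDepth 4000 in
theorem pvTokens_eq : pvColorTokens = pvToks := by decide

theorem pvToks_no_space : ∀ t ∈ pvToks, ' ' ∉ t.toList := by decide

theorem pvPrefixes_have_space : ∀ p ∈ pvColorPrefixes, ' ' ∈ p.toList := by decide

-- partition: when a space is found, the input splits as head ++ ' ' :: tail with
-- no space in head.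
theorem pvPartition_found (cs head tail : List Char)
    (h : pvPartitionSpace cs = (head, true, tail)) :
    cs = head ++ ' ' :: tail ∧ ' ' ∉ head := by
  induction cs generalizing head with
  | nil => exact absurd (congrArg (·.2.1) h) (by simp [pvPartitionSpace])
  | cons c cs ih =>
    by_cases hc : c = ' '
    · subst hc
      have hr : pvPartitionSpace (' ' :: cs) = (([] : List Char), true, cs) := by
        simp [pvPartitionSpace]
      rw [hr] at h
      have h1 : ([] : List Char) = head := congrArg (·.1) h
      have h3 : cs = tail := congrArg (·.2.2) h
      refine ⟨by rw [← h1, ← h3]; rfl, by rw [← h1]; simp⟩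
    · simp only [pvPartitionSpace, hc, if_false, Prod.mk.injEq] at h
      obtain ⟨h1, h2, h3⟩ := h
      obtain ⟨ih1, ih2⟩ := ih _ (by
        have hrepr : pvPartitionSpace cs =
            ((pvPartitionSpace cs).1, (pvPartitionSpace cs).2.1, (pvPartitionSpace cs).2.2) := rfl
        rw [hrepr, h2, h3])
      refine ⟨by rw [← h1, List.cons_append, ← ih1], ?_⟩
      intro hm
      rw [← h1] at hm
      rcases List.mem_cons.mp hm with h' | h'
      · exact hc h'.symm
      · exact ih2 h'

-- partition: found = false means there is no space at all.
theorem pvPartition_not_found (cs : List Char)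
    (h : (pvPartitionSpace cs).2.1 = false) : ' ' ∉ cs := by
  induction cs with
  | nil => simp
  | cons c cs ih =>
    by_cases hc : c = ' '
    · subst hc; simp [pvPartitionSpace] at h
    · simp only [pvPartitionSpace, hc, if_false] at h
      intro hm
      rcases List.mem_cons.mp hm with h' | h'
      · exact hc h'.symm
      · exact ih h h'

-- First words are unique: two space-free words followed by a space that split the
-- same list are equal (and so are the remainders).
theorem pvFirstWord_unique (u : List Char) :
    ∀ (head r tail : List Char), ' ' ∉ u → ' ' ∉ head →
      u ++ ' ' :: r = head ++ ' ' :: tail → u = head ∧ r = tail := by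
  induction u with
  | nil =>
    intro head r tail _ hh heq
    cases head with
    | nil => simpa using heq
    | cons h hs =>
      exfalso
      have : ' ' = h := by simpa using congrArg (·.headI) heq
      exact hh (this ▸ List.mem_cons_self ..)
  | cons c u ih =>
    intro head r tail hu hh heq
    cases head with
    | nil =>
      exfalso
      have : c = ' ' := by simpa using congrArg (·.headI) heq
      exact hu (this ▸ List.mem_cons_self ..)
    | cons h hs =>
      simp only [List.cons_append, List.cons.injEq] at heq
      obtain ⟨hch, hrest⟩ := heq
      obtain ⟨h1, h2⟩ := ih hs r tail (fun hm => hu (List.mem_cons_of_mem _ hm))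
        (fun hm => hh (List.mem_cons_of_mem _ hm)) hrest
      exact ⟨by rw [hch, h1], h2⟩

-- If s has no space at all, no prefix containing a space can match: A's loop returns s.
theorem pvStripFirst_no_space (s : String) (h : ' ' ∉ s.toList) :
    ∀ ps : List String, (∀ p ∈ ps, ' ' ∈ p.toList) → pvStripFirst ps s = s := by
  intro ps hps
  induction ps with
  | nil => rfl
  | cons p ps ih =>
    have hp : ' ' ∈ p.toList := hps p (List.mem_cons_self ..)
    have hnot : PySem.Str.startswith s p = false := by
      rw [PySem.Str.startswith_eq]
      by_contra hc
      have : PySem.Chars.startswith s.toList p.toList = true := by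
        cases hb : PySem.Chars.startswith s.toList p.toList
        · exact absurd hb hc
        · rfl
      have hpre := (PySem.Chars.startswith_iff _ _).mp this
      exact h (hpre.subset hp)
    simp only [pvStripFirst, hnot, Bool.false_eq_true, if_false]
    exact ih (fun q hq => hps q (List.mem_cons_of_mem _ hq))

-- A's loop on a string whose first space splits it as head ++ ' ' :: tail: a token
-- prefix "t " matches iff t is exactly head, and then the slice is the tail.
theorem pvStripFirst_split (s : String) (head tail : List Char)
    (hs : s.toList = head ++ ' ' :: tail) (hh : ' ' ∉ head) :
    ∀ ts : List String, (∀ t ∈ ts, ' ' ∉ t.toList) →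
      pvStripFirst (ts.map (· ++ " ")) s =
        if ts.any (fun t => t.toList = head) then String.ofList tail else s := by
  intro ts hts
  induction ts with
  | nil => simp [pvStripFirst]
  | cons t ts ih =>
    have ht : ' ' ∉ t.toList := hts t (List.mem_cons_self ..)
    have htsp : (t ++ " ").toList = t.toList ++ [' '] := by
      rw [String.toList_append]; rfl
    have hiff : PySem.Str.startswith s (t ++ " ") = true ↔ t.toList = head := by
      rw [PySem.Str.startswith_eq, PySem.Chars.startswith_iff, htsp, hs]
      constructor
      · rintro ⟨r, hr⟩
        rw [List.append_assoc, List.singleton_append] at hr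
        exact (pvFirstWord_unique t.toList head r tail ht hh hr).1
      · intro ht'
        exact ⟨tail, by rw [ht', List.append_assoc, List.singleton_append]⟩
    by_cases hmatch : t.toList = head
    · have hsw : PySem.Str.startswith s (t ++ " ") = true := hiff.mpr hmatch
      have hlen : PySem.Str.len (t ++ " ") = ((head.length + 1 : Nat) : Int) := by
        rw [PySem.Str.len_eq, htsp, hmatch]
        simp
      have hslice : PySem.Str.slice s (some ((head.length + 1 : Nat) : Int)) none
          = String.ofList tail := by
        apply String.toList_inj.mp
        rw [PySem.Str.toList_slice, PySem.Chars.slice_eq_listSlice,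
          PySem.List.slice_from _ (by positivity), hs]
        simp
      simp only [List.map_cons, pvStripFirst, hsw, if_true, hlen, hslice]
      have hany : (t :: ts).any (fun t => t.toList = head) = true := by simp [hmatch]
      rw [hany, if_pos rfl]
    · have hsw : PySem.Str.startswith s (t ++ " ") = false := by
        cases hb : PySem.Str.startswith s (t ++ " ")
        · rfl
        · exact absurd (hiff.mp hb) hmatch
      simp only [List.map_cons, pvStripFirst, hsw, Bool.false_eq_true, if_false]
      rw [ih (fun q hq => hts q (List.mem_cons_of_mem _ hq))]
      have : (t :: ts).any (fun t => t.toList = head) =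
          ts.any (fun t => t.toList = head) := by simp [hmatch]
      rw [this]

-- B's membership test on the first word is A's "some token equals head".
theorem pvContains_iff (head : List Char) :
    (PySem.Set.contains pvColorTokens (String.ofList head) = true) ↔
      pvToks.any (fun t => t.toList = head) = true := by
  rw [pvTokens_eq]
  constructor
  · intro h
    have hmem : String.ofList head ∈ pvToks := by simpa [PySem.Set.contains] using h
    rw [List.any_eq_true]
    exact ⟨_, hmem, by simp⟩
  · intro h
    rw [List.any_eq_true] at h
    obtain ⟨t, htmem, hteq⟩ := h
    simp only [decide_eq_true_eq] at hteq
    have heq : t = String.ofList head := String.toList_inj.mp (by simp [hteq])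
    rw [← heq]
    simpa [PySem.Set.contains] using htmem

-- ===== VERDICT (by name: the statement is the Claim_ definition above) =====
theorem extract_simple_archetype_name_py_spec : Claim_equal_extract_simple_archetype_name_py := by
  intro s _
  unfold Spec_extract_simple_archetype_name_py
  unfold extract_simple_archetype_name_py extract_simple_archetype_name_py_alt
  by_cases hguard : s = "" || s = "Others"
  · simp [hguard]
  · simp only [hguard, Bool.false_eq_true, if_false]
    have hsne : s ≠ "" := by
      intro hc; rw [hc] at hguard; exact hguard rfl
    rcases hp : pvPartitionSpace s.toList with ⟨head, found, tail⟩
    cases found with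
    | false =>
      have hnosp : ' ' ∉ s.toList := pvPartition_not_found s.toList (by rw [hp])
      rw [pvStripFirst_no_space s hnosp pvColorPrefixes pvPrefixes_have_space,
        if_neg hsne]
    | true =>
      obtain ⟨hsplit, hh⟩ := pvPartition_found s.toList head tail hp
      rw [pvPrefixes_eq_map,
        pvStripFirst_split s head tail hsplit hh pvToks pvToks_no_space]
      dsimp only
      by_cases hc : PySem.Set.contains pvColorTokens (String.ofList head) = true
      · rw [if_pos ((pvContains_iff head).mp hc), if_pos hc]
      · rw [if_neg (fun h => hc ((pvContains_iff head).mpr h)), if_neg hc, if_neg hsne]
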